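-- pv_equiv track=rewrite | github.com/PedroLauand/Entropic_Inflation_tests | Current Code/entropy_utils.py | _entropic_caption_from_names
-- ===== SOURCE A (Python) =====
-- from typing import Dict, Iterable, List, Sequence, Tuple, Union
--
-- def _var_names_from_input(n_or_names: Union[int, Sequence[str]]) -> List[str]:
--     if isinstance(n_or_names, int):
--         if n_or_names < 1:
--             raise ValueError("n must be >= 1")
--         return [f"X{i}" for i in range(n_or_names)]
--     names = list(n_or_names)
--     if not names:
--         raise ValueError("names must be a non-empty list")
--     return names
--
-- def _label_for_vars(vars_: Sequence[str], var_order: Sequence[str]) -> str: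
--     order_index = {name: i for i, name in enumerate(var_order)}
--     names = sorted(vars_, key=lambda n: order_index[n])
--     return "S(" + ",".join(names) + ")"
--
-- def _entropic_caption_from_names(names: Sequence[str]) -> List[str]:
--     var_names = _var_names_from_input(names)
--     n = len(var_names)
--     caption: List[str] = []
--     for mask in range(1, 1 << n):
--         subset = [var_names[i] for i in range(n) if (mask >> i) & 1]
--         caption.append(_label_for_vars(subset, var_names))
--     return caption
-- ===== SOURCE B (Python) =====
-- from typing import List, Sequence
--
--
-- def _entropic_caption_from_names(names: Sequence[str]) -> List[str]:
--     var_names = list(names)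
--     if not var_names:
--         raise ValueError("names must be a non-empty list")
--     order_index = {name: i for i, name in enumerate(var_names)}
--     # powerset by incremental doubling: reproduces binary-counting (mask) order
--     subsets: List[List[str]] = [[]]
--     for name in var_names:
--         subsets += [s + [name] for s in subsets]
--     return ["S(" + ",".join(sorted(s, key=order_index.__getitem__)) + ")"
--             for s in subsets if s]
-- ===== Notes on version B (the rewrite author's own statement) =====
-- stated objective: alternative
-- what changed: Replaces the per-bitmask inner bit-test loop and the order-index dict rebuilt for every subset by one incremental powerset doubling (acc = acc + [s+[name] for s in acc], which reproduces binary-counting order) and a single order-index dict built once.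
import Mathlib
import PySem

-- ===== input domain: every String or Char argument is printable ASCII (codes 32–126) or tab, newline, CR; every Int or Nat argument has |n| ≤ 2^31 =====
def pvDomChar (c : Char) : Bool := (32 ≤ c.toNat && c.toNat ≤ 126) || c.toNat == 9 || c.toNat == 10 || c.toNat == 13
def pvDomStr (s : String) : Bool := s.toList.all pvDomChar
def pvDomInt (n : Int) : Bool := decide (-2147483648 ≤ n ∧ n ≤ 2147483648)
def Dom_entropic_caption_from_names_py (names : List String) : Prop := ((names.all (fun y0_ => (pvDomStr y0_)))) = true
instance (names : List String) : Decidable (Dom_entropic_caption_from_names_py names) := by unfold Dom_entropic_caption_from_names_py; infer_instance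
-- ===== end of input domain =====

-- B replaces the per-bitmask inner bit loop by incremental powerset doubling and builds the
-- order-index dict once instead of once per subset (objective: alternative).

-- ===== PORT A =====
-- _var_names_from_input: the argument here is always a list of names (never an int); an empty
-- list raises ValueError, which Pre_ excludes.
def pvVarNamesFromInput (n_or_names : List String) : List String :=
  n_or_names

-- _label_for_vars: order_index = {name: i for i, name in enumerate(var_order)}; the lookup
-- order_index[n] never raises here (every n comes from var_order), so getD 0 is exact on this use.
def pvLabelForVars (vars_ : List String) (varOrder : List String) : String :=
  let orderIndex : PySem.Dict String Int :=
    (PySem.List.enumerate varOrder).foldl (fun d p => d.insert p.2 p.1) PySem.Dict.empty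
  let names := PySem.List.sorted vars_ (fun n => orderIndex.getD n 0) false
  "S(" ++ PySem.Str.join "," names ++ ")"

-- _entropic_caption_from_names: for mask in range(1, 1 << n): subset = [var_names[i] for i in
-- range(n) if (mask >> i) & 1]; caption.append(_label_for_vars(subset, var_names)).
-- i from range(n) is nonnegative, so i.toNat is exact for Python's mask >> i, and var_names[i]
-- is in range, so pyGetD with default "" is exact.
def entropic_caption_from_names_py (names : List String) : List String :=
  let var_names := pvVarNamesFromInput names
  let n := var_names.length
  (PySem.List.pyRange 1 ((1 : Int) <<< n) 1).foldl
    (fun caption mask =>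
      let subset := ((PySem.List.pyRange 0 (n : Int) 1).filter
          (fun i => decide (PySem.Int.band (mask >>> i.toNat) 1 ≠ 0))).map
          (fun i => PySem.List.pyGetD var_names i "")
      caption ++ [pvLabelForVars subset var_names]) []

-- ===== PORT B =====
-- Source B: validation (empty names raises ValueError, outside Pre_), the order-index dict built once,
-- the powerset by incremental doubling, then one comprehension over the non-empty subsets.
-- order_index.__getitem__ never raises here (every element of s is in var_names): getD 0 is exact.
def entropic_caption_from_names_py_alt (names : List String) : List String :=
  let var_names := names
  let orderIndex : PySem.Dict String Int :=
    (PySem.List.enumerate var_names).foldl (fun d p => d.insert p.2 p.1) PySem.Dict.empty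
  let subsets := var_names.foldl (fun acc name => acc ++ acc.map (fun s => s ++ [name]))
    [([] : List String)]
  (subsets.filter (fun s => !s.isEmpty)).map
    (fun s => "S(" ++ PySem.Str.join ","
      (PySem.List.sorted s (fun n => orderIndex.getD n 0) false) ++ ")")

-- ===== PRECONDITION & SPEC =====
-- Python A raises ValueError on an empty names list; Pre_ excludes exactly that input.
def Pre_entropic_caption_from_names_py (names : List String) : Prop := names ≠ []
instance (names : List String) : Decidable (Pre_entropic_caption_from_names_py names) := by
  unfold Pre_entropic_caption_from_names_py; infer_instance
def pvWitness_entropic_caption_from_names_py : List String := ["X0", "X1"]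

def Spec_entropic_caption_from_names_py (names : List String) (out : List String) : Prop := out = entropic_caption_from_names_py_alt names
instance (names : List String) (out : List String) : Decidable (Spec_entropic_caption_from_names_py names out) := by unfold Spec_entropic_caption_from_names_py; infer_instance

-- ===== CLAIM (what is proved, stated in full; the proofs are below) =====
def Claim_equal_entropic_caption_from_names_py : Prop := ∀ (names : List String), Dom_entropic_caption_from_names_py names → Pre_entropic_caption_from_names_py names → Spec_entropic_caption_from_names_py names (entropic_caption_from_names_py names)

-- ===== LEMMAS AND PROOFS =====

-- the subset of ns selected by the bits of m, in index order
def pvNatSubset (ns : List String) (m : Nat) : List String :=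
  ((List.range ns.length).filter (fun i => m.testBit i)).map (fun i => ns.getD i "")

lemma pvNatSubset_zero (ns : List String) : pvNatSubset ns 0 = [] := by
  simp [pvNatSubset]

lemma pvNatSubset_low (ns : List String) (x : String) (m : Nat) (hm : m < 2 ^ ns.length) :
    pvNatSubset (ns ++ [x]) m = pvNatSubset ns m := by
  unfold pvNatSubset
  rw [List.length_append, List.length_singleton, List.range_succ, List.filter_append]
  rw [show (List.filter (fun i => m.testBit i) [ns.length]) = [] by
    simp [Nat.testBit_lt_two_pow hm]]
  rw [List.append_nil]
  apply List.map_congr_left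
  intro i hi
  have : i < ns.length := List.mem_range.mp (List.mem_of_mem_filter hi)
  rw [List.getD_append _ _ _ _ this]

lemma pvNatSubset_high (ns : List String) (x : String) (m : Nat) (hm : m < 2 ^ ns.length) :
    pvNatSubset (ns ++ [x]) (2 ^ ns.length + m) = pvNatSubset ns m ++ [x] := by
  unfold pvNatSubset
  rw [List.length_append, List.length_singleton, List.range_succ, List.filter_append]
  rw [show (List.filter (fun i => (2 ^ ns.length + m).testBit i) [ns.length]) = [ns.length] by
    simp [Nat.testBit_two_pow_add_eq, Nat.testBit_lt_two_pow hm]]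
  rw [List.map_append]
  congr 1
  · rw [show List.filter (fun i => (2 ^ ns.length + m).testBit i) (List.range ns.length)
        = List.filter (fun i => m.testBit i) (List.range ns.length) by
      apply List.filter_congr; intro i hi
      rw [Nat.testBit_two_pow_add_gt (List.mem_range.mp hi) m]]
    apply List.map_congr_left
    intro i hi
    have : i < ns.length := List.mem_range.mp (List.mem_of_mem_filter hi)
    rw [List.getD_append _ _ _ _ this]
  · simp

lemma pvDoubling_eq (ns : List String) :
    ns.foldl (fun acc name => acc ++ acc.map (fun s => s ++ [name])) [([] : List String)]
      = (List.range (2 ^ ns.length)).map (pvNatSubset ns) := by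
  induction ns using List.reverseRecOn with
  | nil => simp [pvNatSubset]
  | append_singleton ns x ih =>
    rw [List.foldl_append, ih]
    simp only [List.foldl_cons, List.foldl_nil]
    rw [show (2 : Nat) ^ (ns ++ [x]).length = 2 ^ ns.length + 2 ^ ns.length by
      rw [List.length_append, List.length_singleton, pow_succ]; ring]
    rw [List.range_add]
    rw [List.map_append, List.map_map, List.map_map]
    congr 1
    · apply List.map_congr_left
      intro m hm
      exact (pvNatSubset_low ns x m (List.mem_range.mp hm)).symm
    · apply List.map_congr_left
      intro m hm
      simp only [Function.comp]
      exact (pvNatSubset_high ns x m (List.mem_range.mp hm)).symm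

lemma pvNatSubset_ne_nil (ns : List String) (m : Nat) (h0 : m ≠ 0) (hm : m < 2 ^ ns.length) :
    pvNatSubset ns m ≠ [] := by
  unfold pvNatSubset
  simp only [ne_eq, List.map_eq_nil_iff, List.filter_eq_nil_iff, not_forall]
  obtain ⟨i, hi⟩ : ∃ i, m.testBit i = true := by
    by_contra h
    push Not at h
    exact h0 (Nat.eq_of_testBit_eq (fun i => by simp [h i]))
  refine ⟨i, List.mem_range.mpr ?_, by simp [hi]⟩
  by_contra hlen
  push Not at hlen
  have : m < 2 ^ i := lt_of_lt_of_le hm (Nat.pow_le_pow_right (by norm_num) hlen)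
  rw [Nat.testBit_lt_two_pow this] at hi
  exact Bool.false_ne_true hi

lemma pvBit (m : Nat) (i : Int) :
    decide (PySem.Int.band (@HShiftRight.hShiftRight Int Nat Int Int.instHShiftRightNat ((m : Int)) i.toNat) 1 ≠ 0) = m.testBit i.toNat := by
  rw [show (@HShiftRight.hShiftRight Int Nat Int Int.instHShiftRightNat ((m : Int)) i.toNat) = ((m >>> i.toNat : Nat) : Int) from by
    simp [Nat.shiftRight_eq_div_pow, Int.shiftRight_eq_div_pow]]
  rw [show (1:Int) = ((1:Nat):Int) by norm_num, PySem.Int.band_natCast]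
  rw [Nat.testBit, Nat.and_one_is_mod]
  rcases Nat.mod_two_eq_zero_or_one (m >>> i.toNat) with h | h <;> simp [h]

lemma pvSubsetInt_eq (ns : List String) (mask : Int) (m : Nat) (hmask : mask = (m : Int)) :
    ((PySem.List.pyRange 0 (ns.length : Int) 1).filter
        (fun i => decide (PySem.Int.band (@HShiftRight.hShiftRight Int Nat Int Int.instHShiftRightNat mask i.toNat) 1 ≠ 0))).map
        (fun i => PySem.List.pyGetD ns i "") = pvNatSubset ns m := by
  subst hmask
  rw [PySem.List.pyRange_one]
  rw [show ((ns.length : Int) - 0).toNat = ns.length by omega]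
  rw [List.filter_map, List.map_map]
  unfold pvNatSubset
  rw [show (List.filter ((fun i => decide (PySem.Int.band (@HShiftRight.hShiftRight Int Nat Int Int.instHShiftRightNat ((m:Int)) i.toNat) 1 ≠ 0)) ∘ (fun k : Nat => (0:Int) + k)) (List.range ns.length))
      = List.filter (fun i => m.testBit i) (List.range ns.length) by
    apply List.filter_congr
    intro i hi
    simp only [Function.comp, zero_add]
    rw [pvBit m i]
    simp]
  apply List.map_congr_left
  intro i hi
  simp only [Function.comp, zero_add]
  rw [PySem.List.pyGetD_natCast]

lemma pv_main (names : List String) :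
    entropic_caption_from_names_py names = entropic_caption_from_names_py_alt names := by
  unfold entropic_caption_from_names_py entropic_caption_from_names_py_alt pvVarNamesFromInput
  simp only []
  rw [pvDoubling_eq]
  rw [PySem.List.foldl_append_singleton_eq_map, List.nil_append]
  rw [show ((1 : Int) <<< names.length) = ((2 ^ names.length : Nat) : Int) by
    simp [Int.shiftLeft_eq]]
  rw [PySem.List.pyRange_one 1 ((2 ^ names.length : Nat) : Int)]
  have h1 : 1 ≤ 2 ^ names.length := Nat.one_le_two_pow
  rw [show (((2 ^ names.length : Nat) : Int) - 1).toNat = 2 ^ names.length - 1 by omega]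
  rw [List.map_map]
  conv_rhs => rw [show (2 : Nat) ^ names.length = 1 + (2 ^ names.length - 1) by omega,
    List.range_add, List.map_append, List.map_map]
  rw [show (List.range 1).map (pvNatSubset names) = [[]] by
    simp [pvNatSubset_zero]]
  rw [List.filter_append]
  rw [show List.filter (fun s => !s.isEmpty) [([] : List String)] = [] by simp]
  rw [List.nil_append]
  rw [List.filter_eq_self.mpr (by
    intro s hs
    obtain ⟨k, hk, rfl⟩ := List.mem_map.mp hs
    have hklt : k < 2 ^ names.length - 1 := List.mem_range.mp hk
    have hlt : 1 + k < 2 ^ names.length := by omega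
    have h2 := pvNatSubset_ne_nil names (1 + k) (by omega) hlt
    simpa [List.isEmpty_iff] using h2)]
  rw [List.map_map]
  apply List.map_congr_left
  intro k hk
  simp only [Function.comp]
  rw [pvSubsetInt_eq names ((1 : Int) + (k : Nat)) (1 + k) (by push_cast; ring)]
  rfl

-- ===== VERDICT (by name: the statement is the Claim_ definition above) =====
theorem entropic_caption_from_names_py_spec : Claim_equal_entropic_caption_from_names_py := by
  intro names _ _
  exact pv_main names
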